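-- pv_equiv track=rewrite | github.com/makasprzak/aoc | day_4/secure_container.py | has_adjacent_digits
-- ===== SOURCE A (Python) =====
-- def has_adjacent_digits(number):
--     s_num = str(number)
--     i = 2
--     blacklisted = 'x'
--     while i < len(s_num) + 1:
--         if blacklisted != s_num[i-2]:
--             blacklisted = 'x'
--             if s_num[i-2] == s_num[i-1]:
--                 if i == len(s_num) or s_num[i-1] != s_num[i]:
--                     return True
--                 else:
--                     blacklisted = s_num[i]
--         i+=1
--     return False
-- ===== SOURCE B (Python) =====
-- def has_adjacent_digits(number):
--     s = str(number)
--     i = 0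
--     while i < len(s):
--         j = i
--         while j < len(s) and s[j] == s[i]:
--             j += 1
--         if j - i == 2:
--             return True
--         i = j
--     return False
-- ===== Notes on version B (the rewrite author's own statement) =====
-- stated objective: simpler
-- what changed: Replaces A's overlapping-window scan with a 'blacklisted' sentinel character suppressing longer runs by a direct grouping pass: an inner pointer jumps over each maximal run of equal characters and the run length is tested for being exactly 2.
import Mathlib
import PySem

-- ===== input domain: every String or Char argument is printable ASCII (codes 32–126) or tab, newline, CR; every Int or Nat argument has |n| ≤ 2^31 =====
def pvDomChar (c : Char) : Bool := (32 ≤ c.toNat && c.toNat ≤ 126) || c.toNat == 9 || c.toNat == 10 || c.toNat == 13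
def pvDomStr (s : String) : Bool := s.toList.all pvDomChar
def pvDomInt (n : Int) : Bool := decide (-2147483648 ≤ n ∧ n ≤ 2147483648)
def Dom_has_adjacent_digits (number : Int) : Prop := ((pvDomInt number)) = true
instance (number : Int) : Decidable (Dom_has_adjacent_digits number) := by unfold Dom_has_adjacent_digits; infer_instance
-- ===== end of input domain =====

-- B replaces A's sentinel-suppressed overlapping-window scan by a direct maximal-run grouping
-- pass testing each run length for exactly 2 (objective: simpler; same linear cost).

-- ===== PORT A =====
-- A's while loop over indices i = 2 .. len(s): state is (i, blacklisted); every index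
-- access A performs is in range when evaluated (i-2, i-1 ≤ len-1 always; s[i] only
-- reached when i ≠ len thanks to `or` short-circuit), so List.getD is exact here.
def pvLoopA (s : List Char) (i : Nat) (bl : Char) : Bool :=
  if _h : i < s.length + 1 then
    if bl ≠ s.getD (i - 2) ' ' then
      if s.getD (i - 2) ' ' = s.getD (i - 1) ' ' then
        if i = s.length ∨ s.getD (i - 1) ' ' ≠ s.getD i ' ' then true
        else pvLoopA s (i + 1) (s.getD i ' ')
      else pvLoopA s (i + 1) 'x'
    else pvLoopA s (i + 1) bl
  else false
termination_by s.length + 1 - i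
decreasing_by all_goals omega

def has_adjacent_digits (number : Int) : Bool :=
  pvLoopA (PySem.Int.toChars number) 2 'x'

-- ===== PORT B =====
-- B's outer loop: each iteration isolates the maximal run starting at the cursor
-- (the inner while loop = takeWhile/dropWhile) and tests that run's length for 2.
def pvChunks : List Char → List (List Char)
  | [] => []
  | a :: t => (a :: t.takeWhile (· == a)) :: pvChunks (t.dropWhile (· == a))
termination_by l => l.length
decreasing_by
  have := List.length_dropWhile_le (· == a) t
  simp
  omega

def has_adjacent_digits_alt (number : Int) : Bool :=
  (pvChunks (PySem.Int.toChars number)).any (fun g => g.length == 2)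

-- ===== PRECONDITION & SPEC =====
def Spec_has_adjacent_digits (number : Int) (out : Bool) : Prop := out = has_adjacent_digits_alt number
instance (number : Int) (out : Bool) : Decidable (Spec_has_adjacent_digits number out) := by unfold Spec_has_adjacent_digits; infer_instance

-- ===== CLAIM (what is proved, stated in full; the proofs are below) =====
def Claim_equal_has_adjacent_digits : Prop := ∀ (number : Int), Dom_has_adjacent_digits number → Spec_has_adjacent_digits number (has_adjacent_digits number)

-- ===== LEMMAS AND PROOFS =====

-- A's scan restated on the suffix s.drop (i-2); same state (blacklist), proof-side only.
def pvScanA : Char → List Char → Bool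
  | _, [] => false
  | _, [_] => false
  | bl, [a, b] =>
    if bl ≠ a then (if a = b then true else pvScanA 'x' [b]) else pvScanA bl [b]
  | bl, a :: b :: c :: rest =>
    if bl ≠ a then
      if a = b then (if b ≠ c then true else pvScanA c (b :: c :: rest))
      else pvScanA 'x' (b :: c :: rest)
    else pvScanA bl (b :: c :: rest)
termination_by _ l => l.length
decreasing_by all_goals simp

theorem pvScanA_nil (bl : Char) : pvScanA bl [] = false := by
  conv_lhs => rw [pvScanA]

theorem pvScanA_single (bl a : Char) : pvScanA bl [a] = false := by
  conv_lhs => rw [pvScanA]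

theorem pvScanA_skip_one (bl a b : Char) (l : List Char) (h : bl = a) :
    pvScanA bl (a :: b :: l) = pvScanA bl (b :: l) := by
  cases l with
  | nil =>
    conv_lhs => rw [pvScanA]
    rw [if_neg (by simp [h])]
  | cons c r =>
    conv_lhs => rw [pvScanA]
    rw [if_neg (by simp [h])]

theorem pvScanA_pair_end (bl a b : Char) (h1 : bl ≠ a) (h2 : a = b) :
    pvScanA bl [a, b] = true := by
  conv_lhs => rw [pvScanA]
  rw [if_pos h1, if_pos h2]

theorem pvScanA_pair_mid (bl a b c : Char) (r : List Char) (h1 : bl ≠ a) (h2 : a = b)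
    (h3 : b ≠ c) : pvScanA bl (a :: b :: c :: r) = true := by
  conv_lhs => rw [pvScanA]
  rw [if_pos h1, if_pos h2, if_pos h3]

theorem pvScanA_run (bl a b c : Char) (r : List Char) (h1 : bl ≠ a) (h2 : a = b)
    (h3 : b = c) : pvScanA bl (a :: b :: c :: r) = pvScanA c (b :: c :: r) := by
  conv_lhs => rw [pvScanA]
  rw [if_pos h1, if_pos h2, if_neg (by simp [h3])]

theorem pvScanA_step (bl a b : Char) (l : List Char) (h1 : bl ≠ a) (h2 : a ≠ b) :
    pvScanA bl (a :: b :: l) = pvScanA 'x' (b :: l) := by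
  cases l with
  | nil =>
    conv_lhs => rw [pvScanA]
    rw [if_pos h1, if_neg h2]
  | cons c r =>
    conv_lhs => rw [pvScanA]
    rw [if_pos h1, if_neg h2]

theorem pvLoopA_eq_scan (s : List Char) (i : Nat) (bl : Char) (h2 : 2 ≤ i) :
    pvLoopA s i bl = pvScanA bl (s.drop (i - 2)) := by
  by_cases h : i < s.length + 1
  · have hi2 : i - 2 < s.length := by omega
    have hi1 : i - 1 < s.length := by omega
    have hd2 : s.drop (i - 2) = s[i - 2] :: s.drop (i - 1) := by
      have e : i - 2 + 1 = i - 1 := by omega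
      rw [List.drop_eq_getElem_cons hi2, e]
    have hd1 : s.drop (i - 1) = s[i - 1] :: s.drop i := by
      have e : i - 1 + 1 = i := by omega
      rw [List.drop_eq_getElem_cons hi1, e]
    have e2 : s.getD (i - 2) ' ' = s[i - 2] := List.getD_eq_getElem s ' ' hi2
    have e1 : s.getD (i - 1) ' ' = s[i - 1] := List.getD_eq_getElem s ' ' hi1
    have hsucc : i + 1 - 2 = i - 1 := by omega
    conv_lhs => rw [pvLoopA]
    rw [dif_pos h, e2, e1]
    by_cases hb : bl = s[i - 2]
    · rw [if_neg (by simp [hb])]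
      rw [pvLoopA_eq_scan s (i + 1) bl (by omega), hsucc]
      rw [hd2, hd1, pvScanA_skip_one bl _ _ _ hb]
    · rw [if_pos hb]
      by_cases hab : s[i - 2] = s[i - 1]
      · rw [if_pos hab]
        by_cases hl : i = s.length
        · have hnil : s.drop i = [] := List.drop_eq_nil_of_le (by omega)
          rw [if_pos (Or.inl hl), hd2, hd1, hnil, pvScanA_pair_end bl _ _ hb hab]
        · have hi : i < s.length := by omega
          have hdi : s.drop i = s[i] :: s.drop (i + 1) := List.drop_eq_getElem_cons hi
          have ei : s.getD i ' ' = s[i] := List.getD_eq_getElem s ' ' hi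
          rw [ei]
          by_cases hbc : s[i - 1] = s[i]
          · rw [if_neg (by simp [hl, hbc])]
            rw [pvLoopA_eq_scan s (i + 1) s[i] (by omega), hsucc]
            rw [hd2, hd1, hdi, pvScanA_run bl _ _ _ _ hb hab hbc]
          · rw [if_pos (Or.inr hbc), hd2, hd1, hdi,
              pvScanA_pair_mid bl _ _ _ _ hb hab hbc]
      · rw [if_neg hab]
        rw [pvLoopA_eq_scan s (i + 1) 'x' (by omega), hsucc]
        rw [hd2, hd1, pvScanA_step bl _ _ _ hb hab]
  · conv_lhs => rw [pvLoopA]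
    rw [dif_neg h]
    have hlen : (s.drop (i - 2)).length ≤ 1 := by
      simp only [List.length_drop]; omega
    match hq : s.drop (i - 2) with
    | [] => rw [pvScanA_nil]
    | [a] => rw [pvScanA_single]
    | a :: b :: r => rw [hq] at hlen; simp at hlen
termination_by s.length + 1 - i
decreasing_by all_goals omega

theorem pvScanA_fresh (bl : Char) (l : List Char)
    (h : ∀ c, l.head? = some c → bl ≠ c ∧ 'x' ≠ c) : pvScanA bl l = pvScanA 'x' l := by
  match l with
  | [] => rw [pvScanA_nil, pvScanA_nil]
  | [a] => rw [pvScanA_single, pvScanA_single]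
  | a :: b :: r =>
    obtain ⟨hbl, hx⟩ := h a rfl
    by_cases hab : a = b
    · cases r with
      | nil => rw [pvScanA_pair_end bl a b hbl hab, pvScanA_pair_end 'x' a b hx hab]
      | cons c r' =>
        by_cases hbc : b = c
        · rw [pvScanA_run bl a b c r' hbl hab hbc, pvScanA_run 'x' a b c r' hx hab hbc]
        · rw [pvScanA_pair_mid bl a b c r' hbl hab hbc,
            pvScanA_pair_mid 'x' a b c r' hx hab hbc]
    · rw [pvScanA_step bl a b r hbl hab, pvScanA_step 'x' a b r hx hab]

theorem pvScanA_skip (a : Char) (m : Nat) (t : List Char)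
    (h : ∀ c, t.head? = some c → a ≠ c ∧ 'x' ≠ c) :
    pvScanA a (List.replicate m a ++ t) = pvScanA 'x' t := by
  induction m with
  | zero => simpa using pvScanA_fresh a t h
  | succ m ih =>
    rw [List.replicate_succ, List.cons_append]
    match hrep : List.replicate m a ++ t with
    | [] =>
      have hm : t = [] := by
        cases t with
        | nil => rfl
        | cons c t' =>
          have : 0 < (List.replicate m a ++ (c :: t')).length := by simp
          rw [hrep] at this; simp at this
      rw [hm, pvScanA_single, pvScanA_nil]
    | b :: r =>
      rw [pvScanA_skip_one a a b r rfl, ← hrep, ih]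

theorem pvTakeWhile_eq_replicate (a : Char) (l : List Char) :
    l.takeWhile (· == a) = List.replicate (l.takeWhile (· == a)).length a := by
  rw [List.eq_replicate_iff]
  refine ⟨rfl, fun b hb => ?_⟩
  have := List.mem_takeWhile_imp hb
  simpa using this

theorem pvHead_dropWhile (p : Char → Bool) (l : List Char) (c : Char)
    (h : (l.dropWhile p).head? = some c) : p c = false := by
  induction l with
  | nil => simp at h
  | cons a t ih =>
    rw [List.dropWhile_cons] at h
    by_cases hp : p a
    · rw [if_pos hp] at h; exact ih h
    · rw [if_neg hp] at h
      simp at h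
      subst h
      simpa using hp

theorem pvScan_eq_chunks_aux (N : Nat) : ∀ (s : List Char), s.length ≤ N → 'x' ∉ s →
    pvScanA 'x' s = (pvChunks s).any (fun g => g.length == 2) := by
  induction N with
  | zero =>
    intro s hN hx
    have hs : s = [] := List.eq_nil_of_length_eq_zero (by omega)
    subst hs
    rw [pvScanA_nil, pvChunks]
    rfl
  | succ N ih =>
    intro s hN hx
    rcases s with _ | ⟨a, _ | ⟨b, t⟩⟩
    · rw [pvScanA_nil, pvChunks]; rfl
    · rw [pvScanA_single, pvChunks]
      simp [pvChunks]
    · have hxa : 'x' ≠ a := fun hh => hx (hh ▸ List.mem_cons_self)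
      simp only [List.length_cons] at hN
      by_cases hab : a = b
      · subst hab
        rcases t with _ | ⟨c, t'⟩
        · rw [pvScanA_pair_end 'x' a a hxa rfl]
          rw [pvChunks]
          simp [pvChunks]
        · by_cases hac : a = c
          · subst hac
            have hxt' : 'x' ∉ t' := fun hh => hx (by simp [hh])
            set u := t'.dropWhile (· == a) with hu_def
            have hu : ∀ d, u.head? = some d → a ≠ d ∧ 'x' ≠ d := by
              intro d hd
              have hpa := pvHead_dropWhile (· == a) t' d hd
              have hdt : d ∈ t' :=
                (List.dropWhile_sublist (· == a)).subset (List.mem_of_mem_head? hd)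
              refine ⟨fun hh => ?_, fun hh => hxt' (hh ▸ hdt)⟩
              rw [← hh] at hpa; simp at hpa
            have hxu : 'x' ∉ u := fun hh => hxt' ((List.dropWhile_sublist (· == a)).subset hh)
            have hulen : u.length ≤ t'.length := List.length_dropWhile_le _ _
            have ht' : t' = List.replicate (t'.takeWhile (· == a)).length a ++ u := by
              conv_lhs => rw [← List.takeWhile_append_dropWhile (p := (· == a)) (l := t')]
              rw [hu_def]
              congr 1
              exact pvTakeWhile_eq_replicate a t'
            have hL : pvScanA 'x' (a :: a :: a :: t') = pvScanA 'x' u := by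
              rw [pvScanA_run 'x' a a a t' hxa rfl rfl]
              have hrep : (a : Char) :: a :: t' =
                  List.replicate ((t'.takeWhile (· == a)).length + 2) a ++ u := by
                rw [show (t'.takeWhile (· == a)).length + 2 =
                      ((t'.takeWhile (· == a)).length + 1) + 1 from rfl,
                   List.replicate_succ, List.replicate_succ, List.cons_append, List.cons_append]
                rw [← ht']
              rw [hrep, pvScanA_skip a _ u hu]
            rw [hL, ih u (by simp at hN; omega) hxu]
            have hR : pvChunks (a :: a :: a :: t') =
                (a :: a :: a :: t'.takeWhile (· == a)) :: pvChunks u := by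
              rw [pvChunks]
              rw [List.takeWhile_cons_of_pos (by simp), List.takeWhile_cons_of_pos (by simp),
                List.dropWhile_cons_of_pos (by simp), List.dropWhile_cons_of_pos (by simp)]
            rw [hR]
            simp
          · rw [pvScanA_pair_mid 'x' a a c t' hxa rfl hac]
            have hR : pvChunks (a :: a :: c :: t') =
                [a, a] :: pvChunks (c :: t') := by
              rw [pvChunks]
              rw [List.takeWhile_cons_of_pos (by simp),
                List.takeWhile_cons_of_neg (by simpa using fun hh => hac hh.symm),
                List.dropWhile_cons_of_pos (by simp),
                List.dropWhile_cons_of_neg (by simpa using fun hh => hac hh.symm)]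
            rw [hR]
            simp
      · have hxbt : 'x' ∉ b :: t := fun hh => hx (List.mem_cons_of_mem _ hh)
        rw [pvScanA_step 'x' a b t hxa hab,
          ih (b :: t) (by simp at hN ⊢; omega) hxbt]
        have hR : pvChunks (a :: b :: t) = [a] :: pvChunks (b :: t) := by
          rw [pvChunks]
          rw [List.takeWhile_cons_of_neg (by simpa using fun hh => hab hh.symm),
            List.dropWhile_cons_of_neg (by simpa using fun hh => hab hh.symm)]
        rw [hR]
        simp

theorem pvScan_eq_chunks (s : List Char) (hx : 'x' ∉ s) :
    pvScanA 'x' s = (pvChunks s).any (fun g => g.length == 2) :=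
  pvScan_eq_chunks_aux s.length s le_rfl hx

theorem pvDigitChar_mod_ne_x (n : Nat) : Nat.digitChar (n % 10) ≠ 'x' := by
  have h10 : n % 10 < 10 := Nat.mod_lt _ (by norm_num)
  set k := n % 10 with hk
  clear_value k
  interval_cases k <;> decide

theorem pvCore_succ (f n : Nat) (acc : List Char) :
    Nat.toDigitsCore 10 (f + 1) n acc =
      if n / 10 = 0 then Nat.digitChar (n % 10) :: acc
      else Nat.toDigitsCore 10 f (n / 10) (Nat.digitChar (n % 10) :: acc) := by
  rw [Nat.toDigitsCore]

theorem pvToDigitsCore_no_x (f : Nat) : ∀ (n : Nat) (acc : List Char),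
    'x' ∉ acc → 'x' ∉ Nat.toDigitsCore 10 f n acc := by
  induction f with
  | zero => intro n acc hacc; simpa [Nat.toDigitsCore] using hacc
  | succ f ih =>
    intro n acc hacc
    rw [pvCore_succ]
    have hacc' : 'x' ∉ Nat.digitChar (n % 10) :: acc := by
      intro hmem
      rcases List.mem_cons.mp hmem with h1 | h2
      · exact pvDigitChar_mod_ne_x n h1.symm
      · exact hacc h2
    by_cases h : n / 10 = 0
    · rw [if_pos h]; exact hacc'
    · rw [if_neg h]; exact ih _ _ hacc'

theorem pvToChars_no_x (n : Int) : 'x' ∉ PySem.Int.toChars n := by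
  unfold PySem.Int.toChars Nat.toDigits
  by_cases h : n < 0
  · rw [if_pos h]
    intro hmem
    rcases List.mem_cons.mp hmem with h1 | h2
    · exact absurd h1 (by decide)
    · exact pvToDigitsCore_no_x _ _ [] (by simp) h2
  · rw [if_neg h]
    exact pvToDigitsCore_no_x _ _ [] (by simp)

-- ===== VERDICT (by name: the statement is the Claim_ definition above) =====
theorem has_adjacent_digits_spec : Claim_equal_has_adjacent_digits := by
  intro number _
  unfold Spec_has_adjacent_digits has_adjacent_digits has_adjacent_digits_alt
  rw [pvLoopA_eq_scan _ 2 'x' (by omega)]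
  simpa using pvScan_eq_chunks (PySem.Int.toChars number) (pvToChars_no_x number)
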